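-- pv_equiv track=rewrite | github.com/torel3/project-euler-solutions | problem_002/solution002.py | even_fibonacci_sum
-- ===== SOURCE A (Python) =====
-- def even_fibonacci_sum(limit):
--     a, b = 1, 2  # First two Fibonacci numbers
--     sum = 0
--
--     while a <= limit:
--         if a % 2 == 0:  # Check if the number is even
--             sum += a
--         a, b = b, a + b  # Move to the next Fibonacci numbers. Python evaluates the right-hand side first before making any assignments.
--
--     return sum
-- ===== SOURCE B (Python) =====
-- def even_fibonacci_sum(limit):
--     # Advance the even-Fibonacci pair (E(n) = 4*E(n-1) + E(n-2)) past the limit;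
--     # no running sum: recover it from the closed form sum = (b - 3*a - 2) // 4,
--     # valid because the sum of even Fibonacci terms telescopes.
--     a, b = 2, 8
--     while a <= limit:
--         a, b = b, 4 * b + a
--     return (b - 3 * a - 2) // 4
-- ===== Notes on version B (the rewrite author's own statement) =====
-- stated objective: alternative
-- what changed: B keeps no running sum: it advances only the even-Fibonacci pair via E(n)=4*E(n-1)+E(n-2) past the limit and recovers the answer from the telescoping closed form (b - 3*a - 2) // 4.
import Mathlib
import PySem

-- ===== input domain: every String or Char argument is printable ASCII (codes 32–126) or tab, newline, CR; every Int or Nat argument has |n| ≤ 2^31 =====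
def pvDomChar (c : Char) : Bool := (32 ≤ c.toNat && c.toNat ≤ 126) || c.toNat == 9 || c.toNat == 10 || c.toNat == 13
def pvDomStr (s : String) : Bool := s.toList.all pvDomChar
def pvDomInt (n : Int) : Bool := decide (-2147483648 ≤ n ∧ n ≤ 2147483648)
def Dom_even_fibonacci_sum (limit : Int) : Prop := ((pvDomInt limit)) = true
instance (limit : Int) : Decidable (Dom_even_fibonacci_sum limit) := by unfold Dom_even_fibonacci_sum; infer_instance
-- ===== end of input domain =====

-- B keeps no running sum: it advances the even-Fibonacci pair (E(n)=4E(n-1)+E(n-2)) past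
-- the limit and recovers the answer from the telescoping closed form (b - 3a - 2) // 4.

-- ===== PORT A =====
-- while-loop of A; the extra guard conjuncts 1 ≤ a ∧ a < b are invariants of the actual
-- execution (start state 1, 2) and only make the recursion well-founded (totality guard).
def evenFibLoopA (limit a b s : Int) : Int :=
  if _h : a ≤ limit ∧ 1 ≤ a ∧ a < b then
    evenFibLoopA limit b (a + b) (if PySem.Int.mod a 2 = 0 then s + a else s)
  else s
termination_by (limit + 1 - a).toNat
decreasing_by omega

def even_fibonacci_sum (limit : Int) : Int := evenFibLoopA limit 1 2 0

-- ===== PORT B =====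
-- B's while-loop carries only the pair (a, b), no accumulator; same totality guard
-- (1 ≤ a ∧ a < b holds throughout from state 2, 8).
def evenFibPairB (limit a b : Int) : Int × Int :=
  if _h : a ≤ limit ∧ 1 ≤ a ∧ a < b then
    evenFibPairB limit b (4 * b + a)
  else (a, b)
termination_by (limit + 1 - a).toNat
decreasing_by omega

def even_fibonacci_sum_alt (limit : Int) : Int :=
  match evenFibPairB limit 2 8 with
  | (a, b) => PySem.Int.floordiv (b - 3 * a - 2) 4

-- ===== PRECONDITION & SPEC =====
def Spec_even_fibonacci_sum (limit : Int) (out : Int) : Prop := out = even_fibonacci_sum_alt limit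
instance (limit : Int) (out : Int) : Decidable (Spec_even_fibonacci_sum limit out) := by unfold Spec_even_fibonacci_sum; infer_instance

-- ===== CLAIM (what is proved, stated in full; the proofs are below) =====
def Claim_equal_even_fibonacci_sum : Prop := ∀ (limit : Int), Dom_even_fibonacci_sum limit → Spec_even_fibonacci_sum limit (even_fibonacci_sum limit)

-- ===== LEMMAS AND PROOFS =====

theorem pymod_two (a : Int) : PySem.Int.mod a 2 = a % 2 :=
  PySem.Int.mod_eq_emod_of_pos (by omega)

-- Three steps of A's loop from an (odd, even) state (a, b) correspond to one step of B's
-- pair loop on (b, 2a+3b); the final pair (x, y) of B determines A's result linearly: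
-- 4·loopA = 4s + (y − 3x − 2) − 2(a − 1).
theorem loopA_eq_pairB (limit : Int) : ∀ (n : Nat) (a b s : Int),
    (limit + 1 - a).toNat ≤ n → 1 ≤ a → a < b → a % 2 = 1 → b % 2 = 0 →
    ∃ x y, evenFibPairB limit b (2 * a + 3 * b) = (x, y) ∧
      4 * evenFibLoopA limit a b s = 4 * s + (y - 3 * x - 2) - 2 * (a - 1) := by
  intro n
  induction n with
  | zero =>
    intro a b s hn ha hab hpa hpb
    refine ⟨b, 2 * a + 3 * b, ?_, ?_⟩
    · rw [evenFibPairB,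
        dif_neg (by omega : ¬ (b ≤ limit ∧ 1 ≤ b ∧ b < 2 * a + 3 * b))]
    · rw [evenFibLoopA, dif_neg (by omega : ¬ (a ≤ limit ∧ 1 ≤ a ∧ a < b))]
      ring
  | succ n ih =>
    intro a b s hn ha hab hpa hpb
    by_cases hA : a ≤ limit
    · -- step 1 of A: a odd, not added
      rw [evenFibLoopA, dif_pos (⟨hA, ha, hab⟩ : a ≤ limit ∧ 1 ≤ a ∧ a < b),
        pymod_two, if_neg (by omega : ¬ (a % 2 = 0))]
      by_cases hB : b ≤ limit
      · -- step 2 of A adds b; B's pair loop also enters, moving to (2a+3b, 8a+13b)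
        rw [evenFibLoopA, dif_pos (by omega : b ≤ limit ∧ 1 ≤ b ∧ b < a + b),
          pymod_two, if_pos hpb]
        have hBstep : evenFibPairB limit b (2 * a + 3 * b)
            = evenFibPairB limit (2 * a + 3 * b) (4 * (2 * a + 3 * b) + b) := by
          rw [evenFibPairB,
            dif_pos (by omega : b ≤ limit ∧ 1 ≤ b ∧ b < 2 * a + 3 * b)]
        by_cases hC : a + b ≤ limit
        · -- step 3 of A: a+b odd, not added
          rw [evenFibLoopA,
            dif_pos (by omega : a + b ≤ limit ∧ 1 ≤ a + b ∧ a + b < b + (a + b)),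
            pymod_two, if_neg (by omega : ¬ ((a + b) % 2 = 0))]
          by_cases hD : a + 2 * b ≤ limit
          · -- recurse: A at (a+2b, 2a+3b), B at the same pair state
            have e1 : b + (a + b) = a + 2 * b := by ring
            have e2 : a + b + (a + 2 * b) = 2 * a + 3 * b := by ring
            rw [e1, e2]
            obtain ⟨x, y, hpair, heq⟩ :=
              ih (a + 2 * b) (2 * a + 3 * b) (s + b) (by omega) (by omega) (by omega)
                (by omega) (by omega)
            refine ⟨x, y, ?_, by omega⟩
            rw [hBstep]
            have e3 : 2 * (a + 2 * b) + 3 * (2 * a + 3 * b)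
                = 4 * (2 * a + 3 * b) + b := by ring
            rw [e3] at hpair
            exact hpair
          · -- A exits with s + b; B's pair loop stops at (2a+3b, 8a+13b)
            rw [evenFibLoopA,
              dif_neg (by omega :
                ¬ (b + (a + b) ≤ limit ∧ 1 ≤ b + (a + b) ∧
                    b + (a + b) < a + b + (b + (a + b))))]
            refine ⟨2 * a + 3 * b, 4 * (2 * a + 3 * b) + b, ?_, by ring⟩
            rw [hBstep, evenFibPairB,
              dif_neg (by omega :
                ¬ (2 * a + 3 * b ≤ limit ∧ 1 ≤ 2 * a + 3 * b ∧
                    2 * a + 3 * b < 4 * (2 * a + 3 * b) + b))]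
        · -- A exits with s + b; B's pair loop stops at (2a+3b, 8a+13b)
          rw [evenFibLoopA,
            dif_neg (by omega : ¬ (a + b ≤ limit ∧ 1 ≤ a + b ∧ a + b < b + (a + b)))]
          refine ⟨2 * a + 3 * b, 4 * (2 * a + 3 * b) + b, ?_, by ring⟩
          rw [hBstep, evenFibPairB,
            dif_neg (by omega :
              ¬ (2 * a + 3 * b ≤ limit ∧ 1 ≤ 2 * a + 3 * b ∧
                  2 * a + 3 * b < 4 * (2 * a + 3 * b) + b))]
      · -- A exits at b without adding; B's pair loop never enters
        rw [evenFibLoopA, dif_neg (by omega : ¬ (b ≤ limit ∧ 1 ≤ b ∧ b < a + b))]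
        refine ⟨b, 2 * a + 3 * b, ?_, by ring⟩
        rw [evenFibPairB,
          dif_neg (by omega : ¬ (b ≤ limit ∧ 1 ≤ b ∧ b < 2 * a + 3 * b))]
    · -- neither loop enters
      rw [evenFibLoopA, dif_neg (by omega : ¬ (a ≤ limit ∧ 1 ≤ a ∧ a < b))]
      refine ⟨b, 2 * a + 3 * b, ?_, by ring⟩
      rw [evenFibPairB,
        dif_neg (by omega : ¬ (b ≤ limit ∧ 1 ≤ b ∧ b < 2 * a + 3 * b))]

-- ===== VERDICT (by name: the statement is the Claim_ definition above) =====
theorem even_fibonacci_sum_spec : Claim_equal_even_fibonacci_sum := by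
  intro limit _hd
  show even_fibonacci_sum limit = even_fibonacci_sum_alt limit
  obtain ⟨x, y, hpair, heq⟩ :=
    loopA_eq_pairB limit (limit + 1 - 1).toNat 1 2 0
      (le_refl _) (by norm_num) (by norm_num) (by norm_num) (by norm_num)
  unfold even_fibonacci_sum even_fibonacci_sum_alt
  have h28 : (2 : Int) * 1 + 3 * 2 = 8 := by norm_num
  rw [(by norm_num : (8 : Int) = 2 * 1 + 3 * 2), hpair]
  dsimp only
  have hy : y - 3 * x - 2 = 4 * evenFibLoopA limit 1 2 0 := by omega
  rw [hy, PySem.Int.floordiv_eq_ediv_of_pos (by norm_num)]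
  omega
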